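-- pv_equiv track=rewrite | github.com/thiniciuz/Fiscal-HUB | server/app/main.py | _shift_year_month
-- ===== SOURCE A (Python) =====
-- def _shift_year_month(year: int, month: int, offset: int) -> tuple[int, int]:
--     m = month + offset
--     y = year
--     while m > 12:
--         m -= 12
--         y += 1
--     while m < 1:
--         m += 12
--         y -= 1
--     return y, m
-- ===== SOURCE B (Python) =====
-- def _shift_year_month(year: int, month: int, offset: int) -> tuple[int, int]:
--     q, r = divmod(month - 1 + offset, 12)
--     return year + q, r + 1
-- ===== Notes on version B (the rewrite author's own statement) =====
-- stated objective: simpler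
-- what changed: Replaced the two normalising while-loops with a single closed-form divmod over the zero-based month index.
import Mathlib
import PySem

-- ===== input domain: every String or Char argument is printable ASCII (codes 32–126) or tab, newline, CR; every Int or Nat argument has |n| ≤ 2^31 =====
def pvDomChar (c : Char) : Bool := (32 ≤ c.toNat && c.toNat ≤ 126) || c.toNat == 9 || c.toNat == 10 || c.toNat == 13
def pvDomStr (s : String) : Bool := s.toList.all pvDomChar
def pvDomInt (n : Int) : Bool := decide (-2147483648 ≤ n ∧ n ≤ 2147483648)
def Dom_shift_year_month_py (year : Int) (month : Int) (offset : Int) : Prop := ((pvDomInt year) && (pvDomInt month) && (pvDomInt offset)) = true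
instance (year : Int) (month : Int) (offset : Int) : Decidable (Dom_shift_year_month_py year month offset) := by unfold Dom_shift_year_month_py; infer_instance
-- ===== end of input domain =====

-- B replaces the two normalising while-loops with one closed-form divmod; objective: simpler.


-- ===== PORT A =====
-- while m > 12: m -= 12; y += 1
def shiftLoopDown (y m : Int) : Int × Int :=
  if h : m > 12 then shiftLoopDown (y + 1) (m - 12) else (y, m)
termination_by m.toNat
decreasing_by omega

-- while m < 1: m += 12; y -= 1
def shiftLoopUp (y m : Int) : Int × Int :=
  if h : m < 1 then shiftLoopUp (y - 1) (m + 12) else (y, m)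
termination_by (1 - m).toNat
decreasing_by omega

def shift_year_month_py (year : Int) (month : Int) (offset : Int) : Int × Int :=
  let m := month + offset
  let y := year
  let p := shiftLoopDown y m
  shiftLoopUp p.1 p.2

-- ===== PORT B =====
def shift_year_month_py_alt (year : Int) (month : Int) (offset : Int) : Int × Int :=
  let idx := month - 1 + offset
  let q := PySem.Int.floordiv idx 12
  let r := PySem.Int.mod idx 12
  (year + q, r + 1)

-- ===== PRECONDITION & SPEC =====
def Spec_shift_year_month_py (year : Int) (month : Int) (offset : Int) (out : Int × Int) : Prop := out = shift_year_month_py_alt year month offset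
instance (year : Int) (month : Int) (offset : Int) (out : Int × Int) : Decidable (Spec_shift_year_month_py year month offset out) := by unfold Spec_shift_year_month_py; infer_instance

-- ===== CLAIM (what is proved, stated in full; the proofs are below) =====
def Claim_equal_shift_year_month_py : Prop := ∀ (year : Int) (month : Int) (offset : Int), Dom_shift_year_month_py year month offset → Spec_shift_year_month_py year month offset (shift_year_month_py year month offset)

-- ===== LEMMAS AND PROOFS =====

theorem loopDown_closed (y m : Int) (h1 : 1 ≤ m) :
    shiftLoopDown y m = (y + (m - 1) / 12, (m - 1) % 12 + 1) := by
  induction y, m using shiftLoopDown.induct with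
  | case1 y m h ih =>
    rw [shiftLoopDown]
    rw [dif_pos h, ih (by omega)]
    simp only [Prod.mk.injEq]; refine ⟨by omega, by omega⟩
  | case2 y m h =>
    rw [shiftLoopDown]
    rw [dif_neg h]
    have h0 : (m - 1) / 12 = 0 ∧ (m - 1) % 12 = m - 1 := by omega
    rw [h0.1, h0.2]
    simp only [Prod.mk.injEq]; refine ⟨by omega, by omega⟩

theorem loopUp_closed (y m : Int) (h1 : m ≤ 12) :
    shiftLoopUp y m = (y + (m - 1) / 12, (m - 1) % 12 + 1) := by
  induction y, m using shiftLoopUp.induct with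
  | case1 y m h ih =>
    rw [shiftLoopUp]
    rw [dif_pos h, ih (by omega)]
    simp only [Prod.mk.injEq]; refine ⟨by omega, by omega⟩
  | case2 y m h =>
    rw [shiftLoopUp]
    rw [dif_neg h]
    have h0 : (m - 1) / 12 = 0 ∧ (m - 1) % 12 = m - 1 := by omega
    rw [h0.1, h0.2]
    simp only [Prod.mk.injEq]; refine ⟨by omega, by omega⟩

theorem loops_closed (y m : Int) :
    shiftLoopUp (shiftLoopDown y m).1 (shiftLoopDown y m).2
      = (y + (m - 1) / 12, (m - 1) % 12 + 1) := by
  by_cases h : 1 ≤ m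
  · rw [loopDown_closed y m h]
    rw [loopUp_closed _ _ (by omega : (m - 1) % 12 + 1 ≤ 12)]
    have h0 : ((m - 1) % 12 + 1 - 1) / 12 = 0 ∧ ((m - 1) % 12 + 1 - 1) % 12 = (m - 1) % 12 := by
      omega
    rw [h0.1, h0.2]
    simp
  · have hd : shiftLoopDown y m = (y, m) := by
      rw [shiftLoopDown, dif_neg (by omega : ¬ m > 12)]
    rw [hd]
    exact loopUp_closed y m (by omega)

-- ===== VERDICT (by name: the statement is the Claim_ definition above) =====
theorem shift_year_month_py_spec : Claim_equal_shift_year_month_py := by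
  intro year month offset _
  show shiftLoopUp (shiftLoopDown year (month + offset)).1 (shiftLoopDown year (month + offset)).2
      = (year + PySem.Int.floordiv (month - 1 + offset) 12,
         PySem.Int.mod (month - 1 + offset) 12 + 1)
  rw [PySem.Int.floordiv_eq_ediv_of_pos (by norm_num), PySem.Int.mod_eq_emod_of_pos (by norm_num)]
  rw [loops_closed]
  simp only [Prod.mk.injEq]; refine ⟨by omega, by omega⟩
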